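-- pv_equiv track=rewrite | github.com/merledu/magma-si | Distribution.py | fn2
-- ===== SOURCE A (Python) =====
-- def fn2(mat,s):
--     b = [[0, 0, 0, 0],
--     [0, 0, 0, 0],
--     [0, 0, 0, 0],
--     [0, 0, 0, 0]]
--     count = 0
--     index = []
--     for i in range(4):
--         for j in range(4):
--             if mat[i][j] != 0 and mat[i][j] == 1:
--                 count += 1
--                 index.append([i,j])
--                 break
--     valid = False
--     #for i in range(index[s][0],index[s][0]+1):
--     for j in range(index[s][1],4):
--         b[index[s][0]][j] = mat[index[s][0]][j]
--         if mat[index[s][0]][j] == 4: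
--             valid = True
--             break
-- #         else:
-- #             continue
-- #         break
--
--     if (valid == False):
--         for i in range(index[s][0]+1,4):
--             for j in range(0,4):
--                 b[i][j] = mat[i][j]
--                 if mat[i][j] == 4:
--                     break
--             else:
--                 continue
--             break
--     return b
-- ===== SOURCE B (Python) =====
-- def fn2(mat, s):
--     # same prologue result as A, phrased as one comprehension: (row, first column of a 1)
--     index = [(i, row[:4].index(1)) for i, row in enumerate(mat[:4]) if 1 in row[:4]]
--     r, c = index[s]
--     start = 4 * r + c
--     # inclusive stop: the first cell at/after the start holding a 4 (or the last cell)
--     end = next((k for k in range(start, 16) if mat[k // 4][k % 4] == 4), 15)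
--     # build the whole grid at once: a cell is copied iff its flat index lies in [start, end]
--     return [[mat[i][j] if start <= 4 * i + j <= end else 0 for j in range(4)]
--             for i in range(4)]
-- ===== Notes on version B (the rewrite author's own statement) =====
-- stated objective: simpler
-- what changed: A's mutating two-phase copy (rest-of-start-row loop, then for/else nested loops with break flags) is replaced by computing one inclusive stop index (the first 4 at/after the start cell, else the last cell) and then building the whole output grid with a single pure comprehension keyed on the flat-index interval; the prologue becomes a comprehension over enumerate.
import Mathlib
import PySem

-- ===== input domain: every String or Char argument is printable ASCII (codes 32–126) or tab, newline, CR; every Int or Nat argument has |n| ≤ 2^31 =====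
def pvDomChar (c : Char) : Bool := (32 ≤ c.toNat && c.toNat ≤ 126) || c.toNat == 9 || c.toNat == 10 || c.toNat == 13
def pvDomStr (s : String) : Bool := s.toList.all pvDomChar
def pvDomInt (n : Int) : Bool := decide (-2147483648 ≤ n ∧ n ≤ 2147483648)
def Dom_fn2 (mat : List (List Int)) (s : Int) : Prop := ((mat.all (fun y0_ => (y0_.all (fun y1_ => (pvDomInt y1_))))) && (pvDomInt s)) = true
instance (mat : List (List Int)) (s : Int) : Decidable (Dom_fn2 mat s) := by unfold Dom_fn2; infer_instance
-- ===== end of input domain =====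

-- B replaces A's stateful two-phase copy-with-break by first computing the inclusive stop
-- index (the first 4 at/after the start cell) and then building the whole grid with one pure
-- comprehension over the flat-index interval; objective: simpler.

-- mat[i][j] for the Nat indices the loops produce (always in range on Pre_; default is a guard only)
def pvGet2 (mat : List (List Int)) (i j : Nat) : Int := (mat.getD i []).getD j 0

-- ===== PORT A =====
-- b[i][j] = v
def pvSet2 (b : List (List Int)) (i j : Nat) (v : Int) : List (List Int) :=
  b.set i ((b.getD i []).set j v)
def pvZeros : List (List Int) := [[0,0,0,0],[0,0,0,0],[0,0,0,0],[0,0,0,0]]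
-- inner prologue loop: first j in range(4) with mat[i][j] != 0 and mat[i][j] == 1 (break)
def pvFindOneA (row : List Int) : Option Nat :=
  (List.range 4).foldl
    (fun st j => match st with
      | some _ => st
      | none => if row.getD j 0 ≠ 0 ∧ row.getD j 0 = 1 then some j else none)
    none
-- prologue: index = [[i,j] …]
def pvIndexA (mat : List (List Int)) : List (Nat × Nat) :=
  (List.range 4).foldl
    (fun acc i => match pvFindOneA (mat.getD i []) with
      | some j => acc ++ [(i, j)]
      | none => acc)
    []
-- 'for j in js: b[r][j] = mat[r][j]; if mat[r][j] == 4: valid = True; break' — returns (b, valid/broke)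
def pvRowLoopA (mat : List (List Int)) (r : Nat) : List (List Int) → List Nat → List (List Int) × Bool
  | b, [] => (b, false)
  | b, j :: js =>
    let b' := pvSet2 b r j (pvGet2 mat r j)
    if pvGet2 mat r j = 4 then (b', true) else pvRowLoopA mat r b' js
-- phase 2: 'for i in is: for j in range(4): … break / else: continue / break'
def pvOuterLoopA (mat : List (List Int)) : List (List Int) → List Nat → List (List Int)
  | b, [] => b
  | b, i :: is =>
    match pvRowLoopA mat i b (List.range 4) with
    | (b', true) => b'
    | (b', false) => pvOuterLoopA mat b' is

def fn2 (mat : List (List Int)) (s : Int) : List (List Int) :=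
  let index := pvIndexA mat
  let rc := (PySem.List.pyGet? index s).getD (0, 0)   -- index[s]; default unreachable on Pre_
  match pvRowLoopA mat rc.1 pvZeros (List.range' rc.2 (4 - rc.2)) with
  | (b1, true) => b1
  | (b1, false) => pvOuterLoopA mat b1 (List.range' (rc.1 + 1) (4 - (rc.1 + 1)))

-- ===== PORT B =====
-- '[(i, row[:4].index(1)) for i, row in enumerate(mat[:4]) if 1 in row[:4]]'
-- (zipIdx is enumerate with the always-nonnegative position as a Nat)
-- (row[:4] = take 4; .index guarded by the membership test, so the .getD 0 is unreachable)
def pvIndexB (mat : List (List Int)) : List (Nat × Nat) :=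
  (List.zipIdx (mat.take 4)).filterMap
    (fun p => if (1 : Int) ∈ p.1.take 4
              then some (p.2, (PySem.List.index? (p.1.take 4) 1).getD 0) else none)

def fn2_alt (mat : List (List Int)) (s : Int) : List (List Int) :=
  let index := pvIndexB mat
  let rc := (PySem.List.pyGet? index s).getD (0, 0)   -- index[s]; unreachable default on Pre_
  let start := 4 * rc.1 + rc.2
  -- next((k for k in range(start, 16) if mat[k//4][k%4] == 4), 15); k ≥ 0, so Nat '/' and
  -- '%' coincide with Python's // and % here
  let e := ((List.range' start (16 - start)).find?
      (fun k => decide (pvGet2 mat (k / 4) (k % 4) = 4))).getD 15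
  (List.range 4).map (fun i => (List.range 4).map (fun j =>
    if start ≤ 4 * i + j ∧ 4 * i + j ≤ e then pvGet2 mat i j else 0))

-- ===== PRECONDITION & SPEC =====
-- Pre_ holds exactly where the Python A returns normally (the A = B equality below in fact
-- holds for every input of the ports, so the proof does not need Pre_'s hypothesis); it excludes exactly the inputs on
-- which A raises IndexError: fewer than 4 rows, a row the prologue scans past its end without
-- meeting a 1, s outside Python-index range of the built index list, or a copy loop that runs
-- past the end of a short row before meeting a 4.
def pvRows1 (mat : List (List Int)) : List Nat :=
  (List.range 4).filter (fun i => ((mat.getD i []).take 4).contains 1)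
-- the row index r = index[s][0] and start column c = index[s][1], stated declaratively
def pvStartRow (mat : List (List Int)) (s : Int) : Nat :=
  (pvRows1 mat).getD (if s < 0 then ((pvRows1 mat).length + s).toNat else s.toNat) 0
-- the two copy phases starting at row r finish without running past a short row's end
def pvPhasesOk (mat : List (List Int)) (r : Nat) : Bool :=
  (decide (4 ≤ (mat.getD r []).length) ||
    decide ((4 : Int) ∈ (mat.getD r []).drop (((mat.getD r []).take 4).idxOf 1))) &&
  (decide ((4 : Int) ∈ ((mat.getD r []).take 4).drop (((mat.getD r []).take 4).idxOf 1)) ||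
    (List.range 4).all (fun i =>
      !(decide (r + 1 ≤ i)) ||
      !((List.range i).all (fun i' =>
          !(decide (r + 1 ≤ i')) || !(decide ((4 : Int) ∈ (mat.getD i' []).take 4)))) ||
      (decide (4 ≤ (mat.getD i []).length) || decide ((4 : Int) ∈ mat.getD i []))))

def pvPreB (mat : List (List Int)) (s : Int) : Bool :=
  decide (4 ≤ mat.length) &&
  (mat.take 4).all (fun row => decide (4 ≤ row.length) || row.contains 1) &&
  decide (-(((pvRows1 mat).length : Int)) ≤ s) && decide (s < ((pvRows1 mat).length : Int)) &&
  pvPhasesOk mat (pvStartRow mat s)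
def Pre_fn2 (mat : List (List Int)) (s : Int) : Prop := pvPreB mat s = true
instance (mat : List (List Int)) (s : Int) : Decidable (Pre_fn2 mat s) := by
  unfold Pre_fn2; infer_instance

def pvWitness_fn2 : List (List Int) × Int :=
  ([[0,1,0,0],[0,0,0,0],[1,0,0,0],[0,4,0,0]], -1)

def Spec_fn2 (mat : List (List Int)) (s : Int) (out : List (List Int)) : Prop := out = fn2_alt mat s
instance (mat : List (List Int)) (s : Int) (out : List (List Int)) : Decidable (Spec_fn2 mat s out) := by unfold Spec_fn2; infer_instance

-- ===== CLAIM (what is proved, stated in full; the proofs are below) =====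
def Claim_equal_fn2 : Prop := ∀ (mat : List (List Int)) (s : Int), Dom_fn2 mat s → Pre_fn2 mat s → Spec_fn2 mat s (fn2 mat s)

-- ===== LEMMAS AND PROOFS =====

-- A's inner prologue scan, characterised: the first 1 in the (0-padded) 4-prefix
lemma findOneA_eq (row : List Int) :
    pvFindOneA row =
      if (1 : Int) ∈ row.take 4
      then some ((PySem.List.index? (row.take 4) 1).getD 0) else none := by
  match row with
  | [] => rfl
  | [a] =>
    simp only [pvFindOneA, List.range, List.range.loop, List.foldl, List.getD, List.take,
      PySem.List.index?_eq_idxOf?, List.idxOf?, List.findIdx?, List.findIdx?.go]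
    by_cases h : a = 1 <;> simp [h] <;> omega
  | [a, b] =>
    simp only [pvFindOneA, List.range, List.range.loop, List.foldl, List.getD, List.take,
      PySem.List.index?_eq_idxOf?, List.idxOf?, List.findIdx?, List.findIdx?.go]
    by_cases h : a = 1 <;> by_cases h2 : b = 1 <;> simp [h, h2] <;> omega
  | [a, b, c] =>
    simp only [pvFindOneA, List.range, List.range.loop, List.foldl, List.getD, List.take,
      PySem.List.index?_eq_idxOf?, List.idxOf?, List.findIdx?, List.findIdx?.go]
    by_cases h : a = 1 <;> by_cases h2 : b = 1 <;> by_cases h3 : c = 1 <;>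
      simp [h, h2, h3] <;> omega
  | a :: b :: c :: d :: t =>
    simp only [pvFindOneA, List.range, List.range.loop, List.foldl, List.getD, List.take,
      PySem.List.index?_eq_idxOf?, List.idxOf?, List.findIdx?, List.findIdx?.go]
    by_cases h : a = 1 <;> by_cases h2 : b = 1 <;> by_cases h3 : c = 1 <;> by_cases h4 : d = 1 <;>
      simp [h, h2, h3, h4] <;> omega

-- the two prologues build the same index list
lemma indexB_eq_indexA (mat : List (List Int)) : pvIndexB mat = pvIndexA mat := by
  match mat with
  | [] => rfl
  | [r0] =>
    by_cases h0 : (1 : Int) ∈ r0.take 4 <;>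
      simp [pvIndexB, pvIndexA, List.range, List.range.loop, List.foldl, findOneA_eq,
        List.getD, List.zipIdx, h0]
  | [r0, r1] =>
    by_cases h0 : (1 : Int) ∈ r0.take 4 <;> by_cases h1 : (1 : Int) ∈ r1.take 4 <;>
      simp [pvIndexB, pvIndexA, List.range, List.range.loop, List.foldl, findOneA_eq,
        List.getD, List.zipIdx, h0, h1]
  | [r0, r1, r2] =>
    by_cases h0 : (1 : Int) ∈ r0.take 4 <;> by_cases h1 : (1 : Int) ∈ r1.take 4 <;>
      by_cases h2 : (1 : Int) ∈ r2.take 4 <;>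
      simp [pvIndexB, pvIndexA, List.range, List.range.loop, List.foldl, findOneA_eq,
        List.getD, List.zipIdx, h0, h1, h2]
  | r0 :: r1 :: r2 :: r3 :: t =>
    by_cases h0 : (1 : Int) ∈ r0.take 4 <;> by_cases h1 : (1 : Int) ∈ r1.take 4 <;>
      by_cases h2 : (1 : Int) ∈ r2.take 4 <;> by_cases h3 : (1 : Int) ∈ r3.take 4 <;>
      simp [pvIndexB, pvIndexA, List.range, List.range.loop, List.foldl, findOneA_eq,
        List.getD, List.zipIdx, h0, h1, h2, h3]

lemma pvFindOneA_lt {row : List Int} {j : Nat} (h : pvFindOneA row = some j) : j < 4 := by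
  unfold pvFindOneA at h
  simp only [List.range, List.range.loop, List.foldl] at h
  split_ifs at h <;> simp_all <;> omega

lemma pvIndexA_fold_mem (mat : List (List Int)) :
    ∀ (l : List Nat) (acc : List (Nat × Nat)),
      (∀ p ∈ acc, p.1 < 4 ∧ p.2 < 4) → (∀ i ∈ l, i < 4) →
      ∀ p ∈ l.foldl
        (fun acc i => match pvFindOneA (mat.getD i []) with
          | some j => acc ++ [(i, j)]
          | none => acc) acc,
        p.1 < 4 ∧ p.2 < 4 := by
  intro l
  induction l with
  | nil => intro acc ha _ p hp; exact ha p hp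
  | cons i is ih =>
    intro acc ha hl p hp
    rw [List.foldl_cons] at hp
    refine ih _ ?_ (fun x hx => hl x (List.mem_cons_of_mem _ hx)) p hp
    intro q hq
    rcases hf : pvFindOneA (mat.getD i []) with _ | j <;> rw [hf] at hq
    · exact ha q hq
    · rcases List.mem_append.mp hq with h' | h'
      · exact ha q h'
      · have : q = (i, j) := by simpa using h'
        subst this
        exact ⟨hl i (List.mem_cons_self ..), pvFindOneA_lt hf⟩

lemma pvIndexA_mem {mat : List (List Int)} {p : Nat × Nat} (h : p ∈ pvIndexA mat) :
    p.1 < 4 ∧ p.2 < 4 := by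
  unfold pvIndexA at h
  exact pvIndexA_fold_mem mat (List.range 4) [] (by simp)
    (fun i hi => List.mem_range.mp hi) p h

-- proof-only helper: the row-major copy-with-break as one flat loop over flat indices
def pvFlatLoop (mat : List (List Int)) : List (List Int) → List Nat → List (List Int)
  | b, [] => b
  | b, idx :: idxs =>
    let i := idx / 4
    let j := idx % 4
    let b' := pvSet2 b i j (pvGet2 mat i j)
    if pvGet2 mat i j = 4 then b' else pvFlatLoop mat b' idxs

-- proof-only helper: the grid with cells of flat index in [lo, t) copied
def pvGrid (mat : List (List Int)) (lo t : Nat) : List (List Int) :=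
  (List.range 4).map (fun i => (List.range 4).map (fun j =>
    if lo ≤ 4 * i + j ∧ 4 * i + j < t then pvGet2 mat i j else 0))

lemma flat_row (mat : List (List Int)) (r : Nat) :
    ∀ (js : List Nat) (b : List (List Int)) (rest : List Nat), (∀ j ∈ js, j < 4) →
      pvFlatLoop mat b (js.map (fun j => r * 4 + j) ++ rest) =
        match pvRowLoopA mat r b js with
        | (b', true) => b'
        | (b', false) => pvFlatLoop mat b' rest := by
  intro js
  induction js with
  | nil => intro b rest _; rfl
  | cons j js ih =>
    intro b rest hjs
    have hj : j < 4 := hjs j (List.mem_cons_self ..)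
    have h1 : (r * 4 + j) / 4 = r := by omega
    have h2 : (r * 4 + j) % 4 = j := by omega
    simp only [List.map_cons, List.cons_append, pvFlatLoop, pvRowLoopA, h1, h2]
    split
    · rfl
    · exact ih _ _ (fun x hx => hjs x (List.mem_cons_of_mem _ hx))

lemma flat_rows (mat : List (List Int)) :
    ∀ (is : List Nat) (b : List (List Int)), (∀ i ∈ is, i < 4) →
      pvFlatLoop mat b ((is.map (fun i => (List.range 4).map (fun j => i * 4 + j))).flatten) =
        pvOuterLoopA mat b is := by
  intro is
  induction is with
  | nil => intro b _; rfl
  | cons i is ih =>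
    intro b his
    rw [List.map_cons, List.flatten_cons,
        flat_row mat i (List.range 4) b _ (fun j hj => List.mem_range.mp hj)]
    unfold pvOuterLoopA
    rcases h : pvRowLoopA mat i b (List.range 4) with ⟨b', br⟩
    cases br
    · exact ih b' (fun x hx => his x (List.mem_cons_of_mem _ hx))
    · rfl

-- A's two-phase copy equals the flat scan, for any start cell (r,c) with r,c < 4
lemma copy_eq (mat : List (List Int)) (r c : Nat) (hr : r < 4) (hc : c < 4) :
    (match pvRowLoopA mat r pvZeros (List.range' c (4 - c)) with
     | (b1, true) => b1
     | (b1, false) => pvOuterLoopA mat b1 (List.range' (r + 1) (4 - (r + 1)))) =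
    pvFlatLoop mat pvZeros (List.range' (r * 4 + c) (16 - (r * 4 + c))) := by
  have hsplit : List.range' (r * 4 + c) (16 - (r * 4 + c)) =
      (List.range' c (4 - c)).map (fun j => r * 4 + j) ++
        ((List.range' (r + 1) (4 - (r + 1))).map
          (fun i => (List.range 4).map (fun j => i * 4 + j))).flatten := by
    interval_cases r <;> interval_cases c <;> rfl
  rw [hsplit, flat_row mat r _ _ _ (fun j hj => by
    have := List.mem_range'_1.mp hj; omega)]
  rcases h : pvRowLoopA mat r pvZeros (List.range' c (4 - c)) with ⟨b1, br⟩
  cases br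
  · exact (flat_rows mat _ b1 (fun i hi => by
      have := List.mem_range'_1.mp hi; omega)).symm
  · rfl

lemma grid_zero (mat : List (List Int)) (lo : Nat) : pvGrid mat lo lo = pvZeros := by
  simp [pvGrid, pvZeros, List.range, List.range.loop, show ∀ m : Nat, ¬(lo ≤ m ∧ m < lo) from
    fun m ⟨a, b⟩ => absurd (a.trans_lt b) (lt_irrefl lo)]

lemma set_grid (mat : List (List Int)) (lo k : Nat) (hlo : lo ≤ k) (hk : k < 16) :
    pvSet2 (pvGrid mat lo k) (k / 4) (k % 4) (pvGet2 mat (k / 4) (k % 4)) =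
      pvGrid mat lo (k + 1) := by
  interval_cases k <;>
    norm_num [pvGrid, pvSet2, List.range, List.range.loop, List.getD, hlo]

-- the flat scan equals the grid cut at (one past) the first 4
lemma flat_eq_grid (mat : List (List Int)) (lo : Nat) :
    ∀ (n k : Nat), k + n = 16 → lo ≤ k →
      pvFlatLoop mat (pvGrid mat lo k) (List.range' k n) =
        pvGrid mat lo ((((List.range' k n).find?
          (fun m => decide (pvGet2 mat (m / 4) (m % 4) = 4))).getD 15) + 1) := by
  intro n
  induction n with
  | zero =>
    intro k hk _
    have : k = 16 := by omega
    subst this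
    rfl
  | succ n ih =>
    intro k hk hlo
    rw [List.range'_succ]
    simp only [pvFlatLoop, List.find?]
    rw [set_grid mat lo k hlo (by omega)]
    by_cases h4 : pvGet2 mat (k / 4) (k % 4) = 4
    · simp [h4]
    · simp only [h4, decide_false]
      exact ih (k + 1) (by omega) (by omega)

-- the whole body of A equals the whole body of B, for any start cell (r,c) with r,c < 4
lemma main_eq (mat : List (List Int)) (r c : Nat) (hr : r < 4) (hc : c < 4) :
    (match pvRowLoopA mat r pvZeros (List.range' c (4 - c)) with
     | (b1, true) => b1
     | (b1, false) => pvOuterLoopA mat b1 (List.range' (r + 1) (4 - (r + 1)))) =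
      (List.range 4).map (fun i => (List.range 4).map (fun j =>
        if 4 * r + c ≤ 4 * i + j ∧ 4 * i + j ≤
            (((List.range' (4 * r + c) (16 - (4 * r + c))).find?
              (fun m => decide (pvGet2 mat (m / 4) (m % 4) = 4))).getD 15)
        then pvGet2 mat i j else 0)) := by
  have hrc : 4 * r + c = r * 4 + c := by ring
  have hgrid : (List.range 4).map (fun i => (List.range 4).map (fun j =>
      if 4 * r + c ≤ 4 * i + j ∧ 4 * i + j ≤
          (((List.range' (4 * r + c) (16 - (4 * r + c))).find?
            (fun m => decide (pvGet2 mat (m / 4) (m % 4) = 4))).getD 15)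
      then pvGet2 mat i j else 0)) =
      pvGrid mat (4 * r + c) ((((List.range' (4 * r + c) (16 - (4 * r + c))).find?
        (fun m => decide (pvGet2 mat (m / 4) (m % 4) = 4))).getD 15) + 1) := by
    simp only [pvGrid, Nat.lt_succ_iff]
  rw [hgrid, copy_eq mat r c hr hc, ← hrc, ← grid_zero mat (4 * r + c)]
  exact flat_eq_grid mat (4 * r + c) (16 - (4 * r + c)) (4 * r + c) (by omega) le_rfl

-- ===== VERDICT (by name: the statement is the Claim_ definition above) =====
theorem fn2_spec : Claim_equal_fn2 := by
  intro mat s _ _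
  unfold Spec_fn2 fn2 fn2_alt
  dsimp only
  rw [indexB_eq_indexA]
  rcases hg : PySem.List.pyGet? (pvIndexA mat) s with _ | p
  · simp only [Option.getD]
    exact main_eq mat 0 0 (by norm_num) (by norm_num)
  · have hm := pvIndexA_mem (PySem.List.mem_of_pyGet?_eq_some _ hg)
    simp only [Option.getD]
    exact main_eq mat p.1 p.2 hm.1 hm.2
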